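-- pv_equiv track=rewrite | github.com/abbaswu/quac | stray/extyper/inferexpr.py | detect_dup_id_pairs
-- ===== SOURCE A (Python) =====
-- from collections import defaultdict
--
-- def detect_dup_id_pairs(reason):
--     node_types = defaultdict(set)
--     for x in reason:
--         node_types[x[0]].add(x[1])
--     if all(len(x)<=1 for x in node_types.values()):
--         reasons = [(x[0],list(x[1])[0]) for x in node_types.items()]
--         return reasons
--     else:
--         return None
-- ===== SOURCE B (Python) =====
-- def detect_dup_id_pairs(reason):
--     result = {}
--     for k, v in reason:
--         if k in result:
--             if result[k] != v:
--                 return None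
--         else:
--             result[k] = v
--     return list(result.items())
-- ===== Notes on version B (the rewrite author's own statement) =====
-- stated objective: simpler
-- what changed: Replaces the two-phase build-dict-of-sets then check-all-set-sizes then extract-singleton pipeline with one pass over a dict of scalar values that returns None as soon as a key recurs with a different value.
import Mathlib
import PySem

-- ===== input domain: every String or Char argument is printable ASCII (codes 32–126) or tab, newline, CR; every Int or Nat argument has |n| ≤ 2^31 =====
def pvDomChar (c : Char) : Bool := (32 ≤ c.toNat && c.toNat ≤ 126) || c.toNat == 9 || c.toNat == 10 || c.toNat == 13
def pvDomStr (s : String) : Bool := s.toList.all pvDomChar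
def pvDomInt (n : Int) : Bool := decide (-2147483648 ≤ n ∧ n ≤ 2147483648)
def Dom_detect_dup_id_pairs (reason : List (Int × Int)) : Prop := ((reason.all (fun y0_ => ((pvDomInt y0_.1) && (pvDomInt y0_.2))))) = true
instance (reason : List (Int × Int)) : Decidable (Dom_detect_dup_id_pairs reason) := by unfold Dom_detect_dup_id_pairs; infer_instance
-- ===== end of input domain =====

-- B replaces A's two-phase build-dict-of-sets / check-set-sizes / extract-singleton pipeline
-- with one conflict-detecting pass over a dict of scalar values (objective: simpler).

-- ===== PORT A =====
def detect_dup_id_pairs (reason : List (Int × Int)) : Option (List (Int × Int)) :=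
  let node_types : PySem.Dict Int (PySem.Set Int) :=
    reason.foldl (fun d x => d.modify x.1 PySem.Set.empty (fun s => PySem.Set.add s x.2)) PySem.Dict.empty
  if node_types.values.all (fun x => PySem.Set.len x ≤ 1) then
    -- list(x[1])[0]: the set is never empty here (every key got at least one add), so the total form pyGetD is exact
    some (node_types.items.map (fun x => (x.1, PySem.List.pyGetD x.2 0 0)))
  else
    none

-- ===== PORT B =====
def detect_dup_id_pairs_go (result : PySem.Dict Int Int) : List (Int × Int) → Option (List (Int × Int))
  | [] => some result.items
  | (k, v) :: rest =>
    if result.contains k then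
      if result.getD k 0 ≠ v then none
      else detect_dup_id_pairs_go result rest
    else detect_dup_id_pairs_go (result.insert k v) rest

def detect_dup_id_pairs_alt (reason : List (Int × Int)) : Option (List (Int × Int)) :=
  detect_dup_id_pairs_go PySem.Dict.empty reason

-- ===== PRECONDITION & SPEC =====
def Spec_detect_dup_id_pairs (reason : List (Int × Int)) (out : Option (List (Int × Int))) : Prop := out = detect_dup_id_pairs_alt reason
instance (reason : List (Int × Int)) (out : Option (List (Int × Int))) : Decidable (Spec_detect_dup_id_pairs reason out) := by unfold Spec_detect_dup_id_pairs; infer_instance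

-- ===== CLAIM (what is proved, stated in full; the proofs are below) =====
def Claim_equal_detect_dup_id_pairs : Prop := ∀ (reason : List (Int × Int)), Dom_detect_dup_id_pairs reason → Spec_detect_dup_id_pairs reason (detect_dup_id_pairs reason)

-- ===== LEMMAS AND PROOFS =====
-- A's loop step and final phase, named for the proofs
def stepA (d : PySem.Dict Int (PySem.Set Int)) (x : Int × Int) : PySem.Dict Int (PySem.Set Int) :=
  d.modify x.1 PySem.Set.empty (fun s => PySem.Set.add s x.2)

def finishA (d : PySem.Dict Int (PySem.Set Int)) : Option (List (Int × Int)) :=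
  if d.values.all (fun x => PySem.Set.len x ≤ 1) then
    some (d.items.map (fun x => (x.1, PySem.List.pyGetD x.2 0 0)))
  else
    none

-- one step of A's loop is an insert of the grown set
theorem stepA_eq_insert (d : PySem.Dict Int (PySem.Set Int)) (x : Int × Int) :
    stepA d x = d.insert x.1 (PySem.Set.add (d.getD x.1 PySem.Set.empty) x.2) := by
  simp [stepA, PySem.Dict.modify]

-- once some key holds a set of size ≥ 2, A's loop can never shrink it, and the final all-check fails
theorem poison : ∀ (rest : List (Int × Int)) (d : PySem.Dict Int (PySem.Set Int)) (k : Int),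
    2 ≤ (d.getD k PySem.Set.empty).length → finishA (rest.foldl stepA d) = none := by
  intro rest
  induction rest with
  | nil =>
    intro d k h
    simp only [List.foldl_nil, finishA, ite_eq_right_iff]
    intro hall
    exfalso
    obtain ⟨s, hs⟩ : ∃ s, d.get? k = some s := by
      cases hg : d.get? k with
      | none => rw [PySem.Dict.getD_eq_get?_getD, hg] at h; simp [PySem.Set.empty] at h
      | some s => exact ⟨s, rfl⟩
    have hlen : 2 ≤ s.length := by
      rw [PySem.Dict.getD_eq_get?_getD, hs] at h; simpa using h
    have hmem : s ∈ d.values := by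
      have := PySem.Dict.mem_items_of_get?_eq_some d hs
      simp only [PySem.Dict.values]
      exact List.mem_map.mpr ⟨(k, s), this, rfl⟩
    have := (List.all_eq_true.mp hall) s hmem
    simp only [PySem.Set.len, decide_eq_true_eq] at this
    omega
  | cons p rest ih =>
    intro d k h
    simp only [List.foldl_cons]
    apply ih
    rw [stepA_eq_insert, PySem.Dict.getD_insert]
    by_cases heq : k = p.1
    · rw [if_pos heq]
      rw [PySem.Set.add_eq_ite]
      subst heq
      split
      · exact h
      · simp only [List.length_append, List.length_singleton]; omega
    · rw [if_neg heq]; exact h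

-- the invariant: A's dict holds exactly the singleton sets of B's dict, in the same order
theorem main_lemma : ∀ (rest : List (Int × Int)) (dA : PySem.Dict Int (PySem.Set Int)) (dB : PySem.Dict Int Int),
    dA.keys.Nodup → dA.items = dB.items.map (fun p => (p.1, [p.2])) →
    finishA (rest.foldl stepA dA) = detect_dup_id_pairs_go dB rest := by
  intro rest
  induction rest with
  | nil =>
    intro dA dB hnd h
    simp only [List.foldl_nil, detect_dup_id_pairs_go, finishA]
    rw [if_pos]
    · rw [h, List.map_map]
      simp [Function.comp_def, PySem.List.pyGetD, PySem.List.pyGet?, PySem.List.pyIdx?]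
    · rw [List.all_eq_true]
      intro s hs
      simp only [PySem.Dict.values, h, List.map_map, List.mem_map] at hs
      obtain ⟨p, _, hp⟩ := hs
      simp only [Function.comp] at hp
      subst hp
      simp [PySem.Set.len]
  | cons x rest ih =>
    intro dA dB hnd h
    obtain ⟨k, v⟩ := x
    have hkeys : dA.keys = dB.keys := by
      simp only [PySem.Dict.keys, h, List.map_map]; rfl
    have hcont : dA.contains k = dB.contains k := by
      rw [PySem.Dict.contains_eq_decide_mem_keys, PySem.Dict.contains_eq_decide_mem_keys, hkeys]
    simp only [List.foldl_cons, detect_dup_id_pairs_go]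
    by_cases hc : dB.contains k = true
    · -- key already present with committed value v0
      obtain ⟨v0, hv0⟩ : ∃ v0, dB.get? k = some v0 := by
        rw [PySem.Dict.contains_eq_isSome_get?] at hc
        cases hg : dB.get? k with
        | none => rw [hg] at hc; simp at hc
        | some w => exact ⟨w, rfl⟩
      have hA0 : dA.get? k = some [v0] := by
        apply PySem.Dict.get?_of_mem_items dA _ hnd
        rw [h, List.mem_map]
        exact ⟨(k, v0), PySem.Dict.mem_items_of_get?_eq_some dB hv0, rfl⟩
      have hgB : dB.getD k 0 = v0 := PySem.Dict.getD_of_get?_eq_some dB 0 hv0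
      have hgA : dA.getD k PySem.Set.empty = [v0] := PySem.Dict.getD_of_get?_eq_some dA _ hA0
      rw [hc, if_pos rfl, hgB]
      by_cases hv : v0 = v
      · -- same value: A's step leaves the dict's items unchanged
        subst hv
        rw [if_neg (by simp)]
        have hstep : (stepA dA (k, v0)).items = dA.items := by
          rw [stepA_eq_insert]
          simp only [hgA]
          rw [PySem.Set.add_of_mem (List.mem_singleton.mpr rfl)]
          rw [PySem.Dict.items_insert_of_contains dA _ (by rw [hcont]; exact hc)]
          conv_rhs => rw [← List.map_id dA.items]
          apply List.map_congr_left
          intro p hp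
          split
          · rename_i hpk
            -- p has key k, and keys are unique, so p = (k, [v0])
            have hk1 : p.1 = k := eq_of_beq hpk
            have h2 : dA.get? p.1 = some p.2 :=
              PySem.Dict.get?_of_mem_items dA (by simpa using hp) hnd
            rw [hk1, hA0] at h2
            have hp2 : p.2 = [v0] := (Option.some.inj h2).symm
            rw [← hk1, ← hp2]
            rfl
          · rfl
        have hk2 : (stepA dA (k, v0)).keys = dA.keys := by
          simp only [PySem.Dict.keys, hstep]
        exact ih (stepA dA (k, v0)) dB (hk2 ▸ hnd) (hstep.trans h)
      · -- conflicting value: the set at k grows to length 2, A ends in None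
        rw [if_pos hv]
        apply poison
        rw [stepA_eq_insert]
        simp only [hgA]
        rw [PySem.Set.add_of_not_mem (by simpa using (Ne.symm hv))]
        rw [PySem.Dict.getD_eq_get?_getD, PySem.Dict.get?_insert_self]
        simp
    · -- fresh key: both dicts append
      have hc' : dB.contains k = false := by simpa using hc
      rw [hc', if_neg (by simp)]
      apply ih
      · rw [stepA_eq_insert]
        exact PySem.Dict.nodup_keys_insert dA k _ hnd
      · rw [stepA_eq_insert]
        rw [PySem.Dict.getD_of_not_contains dA PySem.Set.empty (by rw [hcont]; exact hc')]
        have : PySem.Set.add PySem.Set.empty v = [v] := by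
          rw [PySem.Set.add_eq_ite]; simp [PySem.Set.empty]
        rw [this]
        rw [PySem.Dict.items_insert_of_not_contains dA [v] (by rw [hcont]; exact hc')]
        rw [PySem.Dict.items_insert_of_not_contains dB v hc']
        simp [h]

-- ===== VERDICT (by name: the statement is the Claim_ definition above) =====
theorem detect_dup_id_pairs_spec : Claim_equal_detect_dup_id_pairs := by
  intro reason _
  unfold Spec_detect_dup_id_pairs detect_dup_id_pairs detect_dup_id_pairs_alt
  have h := main_lemma reason PySem.Dict.empty PySem.Dict.empty (by simp [pysem]) (by rfl)
  simpa [finishA, stepA] using h
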